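-- pv_equiv track=rewrite | github.com/e9kwagh/Project-Euler-math-problems | math033/solution.py | product_of_fractions
-- ===== SOURCE A (Python) =====
-- def gcd(a, b):
--     """gcd"""
--     while b:
--         a, b = b, a % b
--     return a
--
-- def simplify_fraction(num, deno):
--     """simplify"""
--     common_divisor = gcd(num, deno)
--     s_num = num // common_divisor
--     s_den = deno // common_divisor
--     return s_num, s_den
--
-- def product_of_fractions(fractions):
--     """product"""
--     result_numerator = 1
--     result_denominator = 1
--     for num, deno in fractions:
--         result_numerator *= num
--         result_denominator *= deno
--
--     # common_divisor = gcd(result_numerator, result_denominator)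
--     simplified_result = simplify_fraction(result_numerator, result_denominator)
--
--     return simplified_result[1]
-- ===== SOURCE B (Python) =====
-- def _gcd(a, b):
--     return _gcd(b, a % b) if b else a
--
-- def product_of_fractions(fractions):
--     num, den = 1, 1
--     for n, d in fractions:
--         num *= n
--         den *= d
--         g = _gcd(abs(num), abs(den))
--         if g:
--             num //= g
--             den //= g
--     return abs(den)
-- ===== Notes on version B (the rewrite author's own statement) =====
-- stated objective: alternative
-- what changed: B folds over the fractions keeping a running numerator/denominator pair reduced to lowest terms after every multiplication (one gcd per fraction, on absolute values) and returns the absolute value of the final denominator, instead of A's multiply-everything-then-reduce-once with a sign-carrying Euclid gcd; B keeps intermediate numbers small.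
-- crash fix: A raises ZeroDivisionError (gcd 0 in simplify_fraction) exactly when some numerator and some denominator in the list are 0, making both products 0; B returns 0 there. — e.g. on product_of_fractions([(0, 1), (1, 0)]): A raises ZeroDivisionError, B returns 0
import Mathlib
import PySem

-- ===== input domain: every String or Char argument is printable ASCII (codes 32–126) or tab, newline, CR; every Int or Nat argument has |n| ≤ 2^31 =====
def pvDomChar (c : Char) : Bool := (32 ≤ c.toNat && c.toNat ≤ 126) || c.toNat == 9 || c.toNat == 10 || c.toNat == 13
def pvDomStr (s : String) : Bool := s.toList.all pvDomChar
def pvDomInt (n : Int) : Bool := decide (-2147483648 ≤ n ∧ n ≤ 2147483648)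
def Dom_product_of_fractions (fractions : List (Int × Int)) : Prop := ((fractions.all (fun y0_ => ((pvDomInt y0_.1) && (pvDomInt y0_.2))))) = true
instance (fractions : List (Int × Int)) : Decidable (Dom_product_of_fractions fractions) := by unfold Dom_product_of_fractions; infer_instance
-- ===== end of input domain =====

-- B reduces a running num/den pair to lowest terms after every multiplication (one gcd per fraction,
-- on absolute values) and returns |final den|, instead of A's multiply-all-then-reduce-once; equal return values on Pre_.

-- ===== PORT A =====
-- fuel = |b| + 1 strictly dominates the Euclid loop's step count (pymod_natAbs_lt); it only
-- makes the while loop a structural recursion, the computation is Python's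
def pygcdFuel : Nat → Int → Int → Int
  | 0, a, _ => a
  | fuel + 1, a, b => if b = 0 then a else pygcdFuel fuel b (PySem.Int.mod a b)

def pygcd (a b : Int) : Int := pygcdFuel (b.natAbs + 1) a b

def pysimplify (num deno : Int) : Int × Int :=
  let g := pygcd num deno
  (PySem.Int.floordiv num g, PySem.Int.floordiv deno g)

def product_of_fractions (fractions : List (Int × Int)) : Int :=
  let p := fractions.foldl (fun acc f => (acc.1 * f.1, acc.2 * f.2)) (1, 1)
  (pysimplify p.1 p.2).2

-- ===== PORT B =====
-- same fuel guard as pygcdFuel: structural recursion for Python's recursive gcd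
def bgcdFuel : Nat → Int → Int → Int
  | 0, a, _ => a
  | fuel + 1, a, b => if b = 0 then a else bgcdFuel fuel b (PySem.Int.mod a b)

def bgcd (a b : Int) : Int := bgcdFuel (b.natAbs + 1) a b

def bstep (nd : Int × Int) (f : Int × Int) : Int × Int :=
  let n := nd.1 * f.1
  let d := nd.2 * f.2
  let g := bgcd (n.natAbs : Int) (d.natAbs : Int)
  if g ≠ 0 then (PySem.Int.floordiv n g, PySem.Int.floordiv d g) else (n, d)

def product_of_fractions_alt (fractions : List (Int × Int)) : Int :=
  (((fractions.foldl bstep (1, 1)).2).natAbs : Int)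

-- ===== PRECONDITION & SPEC =====
-- Pre_ excludes exactly the inputs on which A raises ZeroDivisionError: both running products are 0,
-- i.e. some numerator is 0 and some denominator is 0.
def Pre_product_of_fractions (fractions : List (Int × Int)) : Prop :=
  ¬ ((fractions.any (fun p => p.1 == 0)) = true ∧ (fractions.any (fun p => p.2 == 0)) = true)
instance (fractions : List (Int × Int)) : Decidable (Pre_product_of_fractions fractions) := by unfold Pre_product_of_fractions; infer_instance

def pvWitness_product_of_fractions : (List (Int × Int)) := [(1, 2), (-3, 4), (0, 6)]

-- A raises ZeroDivisionError exactly when some numerator and some denominator are 0; B returns 0 there.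
def Raises_product_of_fractions (fractions : List (Int × Int)) : Prop :=
  (fractions.any (fun p => p.1 == 0)) = true ∧ (fractions.any (fun p => p.2 == 0)) = true
instance (fractions : List (Int × Int)) : Decidable (Raises_product_of_fractions fractions) := by unfold Raises_product_of_fractions; infer_instance
def pvRaiseWitness_product_of_fractions : (List (Int × Int)) := [(0, 1), (1, 0)]
def pvRaiseWitnessOut_product_of_fractions : Int := 0

def Spec_product_of_fractions (fractions : List (Int × Int)) (out : Int) : Prop := out = product_of_fractions_alt fractions
instance (fractions : List (Int × Int)) (out : Int) : Decidable (Spec_product_of_fractions fractions out) := by unfold Spec_product_of_fractions; infer_instance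

-- ===== CLAIM (what is proved, stated in full; the proofs are below) =====
def Claim_equal_product_of_fractions : Prop := ∀ (fractions : List (Int × Int)), Dom_product_of_fractions fractions → Pre_product_of_fractions fractions → Spec_product_of_fractions fractions (product_of_fractions fractions)
def Claim_raises_product_of_fractions : Prop := (∀ (fractions : List (Int × Int)), Dom_product_of_fractions fractions → Raises_product_of_fractions fractions → ¬ Pre_product_of_fractions fractions) ∧ (Dom_product_of_fractions (pvRaiseWitness_product_of_fractions) ∧ Raises_product_of_fractions (pvRaiseWitness_product_of_fractions) ∧ product_of_fractions_alt (pvRaiseWitness_product_of_fractions) = pvRaiseWitnessOut_product_of_fractions)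

-- ===== LEMMAS AND PROOFS =====

-- Python's a % b shrinks in absolute value (the Euclid loop's measure)
theorem pymod_natAbs_lt (a b : Int) (hb : b ≠ 0) : (PySem.Int.mod a b).natAbs < b.natAbs := by
  rcases lt_or_gt_of_ne hb with h | h
  · have h1 := PySem.Int.mod_neg_bounds a h
    omega
  · have h1 := PySem.Int.mod_nonneg a h
    have h2 := PySem.Int.mod_lt a h
    omega

theorem gcd_mod (a b : Int) : Int.gcd b (PySem.Int.mod a b) = Int.gcd a b := by
  have h := PySem.Int.floordiv_mul_add_mod a b
  have : PySem.Int.mod a b = a + b * (-(PySem.Int.floordiv a b)) := by linarith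
  rw [this, Int.gcd_add_mul_left_right, Int.gcd_comm]

-- pygcd returns sign(b) * gcd for b ≠ 0
theorem pygcdFuel_eq : ∀ fuel : Nat, ∀ a b : Int, b.natAbs < fuel → b ≠ 0 →
    pygcdFuel fuel a b = b.sign * (Int.gcd a b : Int) := by
  intro fuel
  induction fuel with
  | zero => intro a b hlt _; omega
  | succ fuel ih =>
    intro a b hlt hb
    rw [pygcdFuel, if_neg hb]
    obtain ⟨f, rfl⟩ : ∃ f, fuel = f + 1 := ⟨fuel - 1, by omega⟩
    by_cases hm : PySem.Int.mod a b = 0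
    · rw [pygcdFuel, if_pos hm]
      have hdvd : b ∣ a := (PySem.Int.mod_eq_zero_iff_dvd a b).mp hm
      have hg : Int.gcd a b = b.natAbs := by
        rw [Int.gcd_def, Nat.gcd_comm]
        exact Nat.gcd_eq_left (Int.natAbs_dvd_natAbs.mpr hdvd)
      rw [hg, Int.sign_mul_natAbs]
    · have hlt' : (PySem.Int.mod a b).natAbs < f + 1 := by
        have := pymod_natAbs_lt a b hb; omega
      rw [ih b _ hlt' hm, gcd_mod]
      congr 1
      rcases lt_or_gt_of_ne hb with h | h
      · have h1 := PySem.Int.mod_neg_bounds a h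
        rw [Int.sign_eq_neg_one_of_neg h, Int.sign_eq_neg_one_of_neg (by omega)]
      · have h1 := PySem.Int.mod_nonneg a h
        rw [Int.sign_eq_one_of_pos h, Int.sign_eq_one_of_pos (by omega)]

theorem pygcd_eq (a b : Int) (hb : b ≠ 0) : pygcd a b = b.sign * (Int.gcd a b : Int) :=
  pygcdFuel_eq _ a b (by omega) hb

-- bgcd agrees with Nat.gcd on casts of naturals
theorem bgcdFuel_natCast : ∀ fuel : Nat, ∀ k m : Nat, k < fuel →
    bgcdFuel fuel (m : Int) (k : Int) = (Nat.gcd m k : Int) := by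
  intro fuel
  induction fuel with
  | zero => intro k m hlt; omega
  | succ fuel ih =>
    intro k m hlt
    by_cases hk : k = 0
    · subst hk; rw [bgcdFuel]; simp
    · rw [bgcdFuel, if_neg (by exact_mod_cast hk)]
      rw [PySem.Int.mod_natCast m k, ih (m % k) k (by
        have := Nat.mod_lt m (Nat.pos_of_ne_zero hk); omega)]
      rw [Nat.gcd_comm k (m % k), ← Nat.gcd_rec, Nat.gcd_comm]

theorem bgcd_natCast (m k : Nat) : bgcd (m : Int) (k : Int) = (Nat.gcd m k : Int) := by
  unfold bgcd
  rw [Int.natAbs_natCast]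
  exact bgcdFuel_natCast (k + 1) k m (by omega)

theorem floordiv_exact (a g : Int) (_hg : g ≠ 0) (h : g ∣ a) :
    PySem.Int.floordiv a g * g = a := by
  have hm : PySem.Int.mod a g = 0 := (PySem.Int.mod_eq_zero_iff_dvd a g).mpr h
  have := PySem.Int.floordiv_mul_add_mod a g
  omega

-- products as a pair-fold
def pstep (acc f : Int × Int) : Int × Int := (acc.1 * f.1, acc.2 * f.2)

theorem pfold_eq (l : List (Int × Int)) : ∀ a b : Int,
    l.foldl pstep (a, b) = (a * (l.map Prod.fst).prod, b * (l.map Prod.snd).prod) := by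
  induction l with
  | nil => simp
  | cons x t ih => intro a b; simp [List.foldl_cons, pstep, ih, mul_assoc]

-- the B-side invariant
def PInv (nd ND : Int × Int) : Prop :=
  nd.1.natAbs * Int.gcd ND.1 ND.2 = ND.1.natAbs ∧ nd.2.natAbs * Int.gcd ND.1 ND.2 = ND.2.natAbs

theorem inv_step (nd ND f : Int × Int) (h : PInv nd ND) :
    PInv (bstep nd f) (pstep ND f) := by
  obtain ⟨h1, h2⟩ := h
  set n := nd.1 * f.1 with hn
  set d := nd.2 * f.2 with hd
  set g : Nat := Nat.gcd n.natAbs d.natAbs with hgdef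
  have e1 : (ND.1 * f.1).natAbs = n.natAbs * Int.gcd ND.1 ND.2 := by
    rw [Int.natAbs_mul, ← h1, hn, Int.natAbs_mul]; ring
  have e2 : (ND.2 * f.2).natAbs = d.natAbs * Int.gcd ND.1 ND.2 := by
    rw [Int.natAbs_mul, ← h2, hd, Int.natAbs_mul]; ring
  have hG' : Int.gcd (ND.1 * f.1) (ND.2 * f.2) = g * Int.gcd ND.1 ND.2 := by
    rw [Int.gcd_def, ← Int.gcd_def, Int.gcd, e1, e2, Nat.gcd_mul_right]
  have hbg : bgcd (n.natAbs : Int) (d.natAbs : Int) = (g : Int) := bgcd_natCast _ _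

  by_cases hg : g = 0
  · have hn0 : n.natAbs = 0 := by
      have := Nat.eq_zero_of_gcd_eq_zero_left (hgdef ▸ hg); omega
    have hd0 : d.natAbs = 0 := by
      have := Nat.eq_zero_of_gcd_eq_zero_right (hgdef ▸ hg); omega
    have : bstep nd f = (n, d) := by
      rw [bstep]; simp only [← hn, ← hd, hbg, hg]; simp
    rw [this]
    constructor
    · show n.natAbs * Int.gcd (ND.1 * f.1) (ND.2 * f.2) = (ND.1 * f.1).natAbs
      rw [e1, hn0]; simp
    · show d.natAbs * Int.gcd (ND.1 * f.1) (ND.2 * f.2) = (ND.2 * f.2).natAbs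
      rw [e2, hd0]; simp
  · have hgI : (g : Int) ≠ 0 := by exact_mod_cast hg
    have hstep : bstep nd f = (PySem.Int.floordiv n g, PySem.Int.floordiv d g) := by
      rw [bstep]; simp only [← hn, ← hd, hbg]
      rw [if_pos hgI]
    have hdvd_n : (g : Int) ∣ n := by
      have : g ∣ n.natAbs := Nat.gcd_dvd_left _ _
      exact Int.dvd_natAbs.mp (Int.natCast_dvd_natCast.mpr this)
    have hdvd_d : (g : Int) ∣ d := by
      have : g ∣ d.natAbs := Nat.gcd_dvd_right _ _
      exact Int.dvd_natAbs.mp (Int.natCast_dvd_natCast.mpr this)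
    have en := floordiv_exact n g hgI hdvd_n
    have ed := floordiv_exact d g hgI hdvd_d
    rw [hstep]
    constructor
    · show (PySem.Int.floordiv n g).natAbs * Int.gcd (ND.1 * f.1) (ND.2 * f.2) = (ND.1 * f.1).natAbs
      have : (PySem.Int.floordiv n g).natAbs * g = n.natAbs := by
        have := congrArg Int.natAbs en
        rw [Int.natAbs_mul] at this; simpa using this
      rw [hG', e1, ← this]; ring
    · show (PySem.Int.floordiv d g).natAbs * Int.gcd (ND.1 * f.1) (ND.2 * f.2) = (ND.2 * f.2).natAbs
      have : (PySem.Int.floordiv d g).natAbs * g = d.natAbs := by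
        have := congrArg Int.natAbs ed
        rw [Int.natAbs_mul] at this; simpa using this
      rw [hG', e2, ← this]; ring

theorem inv_fold (l : List (Int × Int)) : ∀ nd ND : Int × Int, PInv nd ND →
    PInv (l.foldl bstep nd) (l.foldl pstep ND) := by
  induction l with
  | nil => intro nd ND h; exact h
  | cons x t ih => intro nd ND h; exact ih _ _ (inv_step nd ND x h)

-- A's result equals |D| / gcd(N, D) whenever N and D are not both 0
theorem a_val (N D : Int) (h : ¬ (N = 0 ∧ D = 0)) :
    PySem.Int.floordiv D (pygcd N D) = ((D.natAbs / Int.gcd N D : Nat) : Int) := by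
  by_cases hD : D = 0
  · subst hD
    have hN : N ≠ 0 := fun hN => h ⟨hN, rfl⟩
    have hz : pygcd N 0 = N := by rw [pygcd, pygcdFuel, if_pos rfl]
    rw [hz]
    have := floordiv_exact 0 N hN (dvd_zero N)
    have : PySem.Int.floordiv 0 N = 0 := by
      rcases mul_eq_zero.mp this with h' | h'
      · exact h'
      · exact absurd h' hN
    rw [this]; simp
  · rw [pygcd_eq N D hD]
    set G : Nat := Int.gcd N D with hG
    have hGpos : 0 < G := Int.gcd_pos_of_ne_zero_right N hD
    have hdvd : (D.sign * (G : Int)) ∣ D := by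
      have : (G : Int) ∣ D := Int.gcd_dvd_right N D
      rcases lt_or_gt_of_ne hD with hneg | hpos
      · rw [Int.sign_eq_neg_one_of_neg hneg]; simpa using this.neg_left
      · rw [Int.sign_eq_one_of_pos hpos]; simpa using this
    have hsg : D.sign * (G : Int) ≠ 0 := by
      rcases lt_or_gt_of_ne hD with hneg | hpos
      · rw [Int.sign_eq_neg_one_of_neg hneg]; simp; omega
      · rw [Int.sign_eq_one_of_pos hpos]; simp; omega
    have he := floordiv_exact D _ hsg hdvd
    set q := PySem.Int.floordiv D (D.sign * (G : Int)) with hq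
    have hqG : q * (G : Int) = D * D.sign := by
      have : q * (D.sign * (G : Int)) * D.sign = D * D.sign := by rw [he]
      calc q * (G : Int) = q * (D.sign * (G : Int)) * D.sign := by
            rcases lt_or_gt_of_ne hD with hneg | hpos
            · rw [Int.sign_eq_neg_one_of_neg hneg]; ring
            · rw [Int.sign_eq_one_of_pos hpos]; ring
        _ = D * D.sign := this
    have habs : D * D.sign = (D.natAbs : Int) := by
      rcases lt_or_gt_of_ne hD with hneg | hpos
      · rw [Int.sign_eq_neg_one_of_neg hneg]; omega
      · rw [Int.sign_eq_one_of_pos hpos]; omega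
    rw [habs] at hqG
    have hq0 : 0 ≤ q := by
      by_contra hneg
      push Not at hneg
      nlinarith [(by positivity : (0:Int) ≤ (D.natAbs : Int)), (by exact_mod_cast hGpos : (0:Int) < (G:Int))]
    have : q.toNat * G = D.natAbs := by
      have := congrArg Int.toNat hqG
      rwa [Int.toNat_mul (by omega) (by positivity), Int.toNat_natCast, Int.toNat_natCast] at this
    have : q.toNat = D.natAbs / G := by
      rw [← this, Nat.mul_div_cancel _ hGpos]
    omega

-- under Pre_, the two products are not both 0
theorem not_both_zero (l : List (Int × Int)) (hpre : Pre_product_of_fractions l) :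
    ¬ ((l.map Prod.fst).prod = 0 ∧ (l.map Prod.snd).prod = 0) := by
  rintro ⟨h1, h2⟩
  apply hpre
  constructor
  · rcases List.prod_eq_zero_iff.mp h1 with h
    rcases List.mem_map.mp h with ⟨p, hp, hz⟩
    exact List.any_eq_true.mpr ⟨p, hp, by simp [← hz]⟩
  · rcases List.prod_eq_zero_iff.mp h2 with h
    rcases List.mem_map.mp h with ⟨p, hp, hz⟩
    exact List.any_eq_true.mpr ⟨p, hp, by simp [← hz]⟩

-- ===== VERDICT (by name: the statement is the Claim_ definition above) =====
theorem product_of_fractions_spec : Claim_equal_product_of_fractions := by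
  unfold Claim_equal_product_of_fractions
  intro l _ hpre
  unfold Spec_product_of_fractions product_of_fractions product_of_fractions_alt pysimplify
  have hp : l.foldl (fun acc f => (acc.1 * f.1, acc.2 * f.2)) ((1 : Int), (1 : Int)) =
      l.foldl pstep (1, 1) := by rfl
  rw [hp, pfold_eq l 1 1]
  simp only [one_mul]
  set N := (l.map Prod.fst).prod
  set D := (l.map Prod.snd).prod
  have hnb := not_both_zero l hpre
  have hinv : PInv (l.foldl bstep (1, 1)) (l.foldl pstep (1, 1)) := by
    apply inv_fold
    constructor <;> simp [Int.gcd]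
  rw [pfold_eq l 1 1] at hinv
  simp only [one_mul] at hinv
  obtain ⟨_, h2⟩ := hinv
  have hG : Int.gcd N D ≠ 0 := by
    intro h0
    exact hnb ⟨Int.eq_zero_of_gcd_eq_zero_left h0, Int.eq_zero_of_gcd_eq_zero_right h0⟩
  rw [a_val N D (by tauto)]
  have : (l.foldl bstep (1, 1)).2.natAbs = D.natAbs / Int.gcd N D := by
    rw [← h2, Nat.mul_div_cancel _ (Nat.pos_of_ne_zero hG)]
  rw [this]

@[simp] theorem product_of_fractions_raises : Claim_raises_product_of_fractions := by
  unfold Claim_raises_product_of_fractions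
  exact ⟨fun l _ hr hp => hp hr, by decide⟩
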